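-- pv_equiv track=rewrite | github.com/zhiqiang73-cpu/decidedplan | monitor/smart_exit_policy.py | normalize_family
-- ===== SOURCE A (Python) =====
-- def normalize_family(rule_name: str) -> str:
--     if not rule_name:
--         return ""
--     for prefix in (
--         "C1_",
--         "P0-2_",
--         "P1-2_",
--         "P1-6_",
--         "P1-8_",
--         "P1-9_",
--         "P1-10_",
--         "P1-11_",
--     ):
--         if rule_name.startswith(prefix):
--             return prefix[:-1]
--     return rule_name
-- ===== SOURCE B (Python) =====
-- _KEYS = {"C1", "P0-2", "P1-2", "P1-6", "P1-8", "P1-9", "P1-10", "P1-11"}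
--
--
-- def normalize_family(rule_name: str) -> str:
--     if not rule_name:
--         return ""
--     idx = rule_name.find('_')
--     if idx == -1:
--         return rule_name
--     candidate = rule_name[:idx]
--     return candidate if candidate in _KEYS else rule_name
-- ===== Notes on version B (the rewrite author's own statement) =====
-- stated objective: idiomatic
-- what changed: Replaced the scan over eight literal prefixes by extracting the text before the first underscore once (str.find) and doing one set-membership lookup of that candidate key.
import Mathlib
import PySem

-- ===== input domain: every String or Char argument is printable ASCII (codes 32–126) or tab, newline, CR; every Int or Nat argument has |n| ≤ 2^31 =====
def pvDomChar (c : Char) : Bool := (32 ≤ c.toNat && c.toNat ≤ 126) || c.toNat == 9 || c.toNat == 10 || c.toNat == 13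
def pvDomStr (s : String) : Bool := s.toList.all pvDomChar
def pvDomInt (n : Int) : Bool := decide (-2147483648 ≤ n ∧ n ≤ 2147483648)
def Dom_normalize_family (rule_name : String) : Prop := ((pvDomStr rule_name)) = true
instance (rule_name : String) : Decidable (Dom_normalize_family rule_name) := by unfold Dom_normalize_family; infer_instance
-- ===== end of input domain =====

-- B replaces A's scan over eight literal prefixes by one find of the first underscore
-- and a single set-membership lookup of the extracted key (idiomatic; same cost class).

-- ===== PORT A =====
def nfPrefixes : List String := ["C1_", "P0-2_", "P1-2_", "P1-6_", "P1-8_", "P1-9_", "P1-10_", "P1-11_"]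

def nfLoop (rule_name : String) : List String → String
  | [] => rule_name
  | p :: rest =>
      if PySem.Str.startswith rule_name p then PySem.Str.slice p none (some (-1))
      else nfLoop rule_name rest

def normalize_family (rule_name : String) : String :=
  if rule_name = "" then "" else nfLoop rule_name nfPrefixes

-- ===== PORT B =====
def nfKeys : PySem.Set String :=
  PySem.Set.ofList ["C1", "P0-2", "P1-2", "P1-6", "P1-8", "P1-9", "P1-10", "P1-11"]

def normalize_family_alt (rule_name : String) : String :=
  if rule_name = "" then "" else
  let idx := PySem.Str.find rule_name "_"
  if idx = -1 then rule_name
  else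
    let candidate := PySem.Str.slice rule_name none (some idx)
    if nfKeys.contains candidate then candidate else rule_name

-- ===== PRECONDITION & SPEC =====
def Spec_normalize_family (rule_name : String) (out : String) : Prop := out = normalize_family_alt rule_name
instance (rule_name : String) (out : String) : Decidable (Spec_normalize_family rule_name out) := by unfold Spec_normalize_family; infer_instance

-- ===== CLAIM (what is proved, stated in full; the proofs are below) =====
def Claim_equal_normalize_family : Prop := ∀ (rule_name : String), Dom_normalize_family rule_name → Spec_normalize_family rule_name (normalize_family rule_name)

-- ===== LEMMAS AND PROOFS =====

/-- `find.go` on the single-char pattern `['_']`: either no underscore occurs (result `-1`),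
or the list splits at its first underscore and the result is the accumulator plus the
length of the underscore-free part. -/
lemma nf_go_split (cs : List Char) (k : Nat) :
    (PySem.Chars.find.go ['_'] cs k = -1 ∧ '_' ∉ cs) ∨
    ∃ pre post, cs = pre ++ '_' :: post ∧ '_' ∉ pre ∧
      PySem.Chars.find.go ['_'] cs k = (k : Int) + pre.length := by
  induction cs generalizing k with
  | nil => exact Or.inl ⟨by simp [PySem.Chars.find.go], by simp⟩
  | cons c t ih =>
    by_cases hc : c = '_'
    · exact Or.inr ⟨[], t, by simp [hc], by simp,
        by simp [PySem.Chars.find.go, hc, List.isPrefixOf]⟩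
    · have hp : (['_'].isPrefixOf (c :: t)) = false := by
        simp [List.isPrefixOf]
        exact fun h => hc h.symm
      rcases ih (k + 1) with ⟨h1, h2⟩ | ⟨pre, post, hcs, hpre, hv⟩
      · refine Or.inl ⟨by simp [PySem.Chars.find.go, hp, h1], ?_⟩
        simp [h2]
        exact fun h => hc h.symm
      · refine Or.inr ⟨c :: pre, post, by simp [hcs], ?_, ?_⟩
        · simp [hpre]
          exact fun h => hc h.symm
        simp [PySem.Chars.find.go, hp, hv]
        ring

lemma nf_find_split (cs : List Char) :
    (PySem.Chars.find cs ['_'] = -1 ∧ '_' ∉ cs) ∨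
    ∃ pre post, cs = pre ++ '_' :: post ∧ '_' ∉ pre ∧
      PySem.Chars.find cs ['_'] = (pre.length : Int) := by
  have := nf_go_split cs 0
  simpa [PySem.Chars.find] using this

/-- The split at the FIRST underscore is unique. -/
lemma nf_first_underscore_unique (pre : List Char) :
    ∀ (key post rest : List Char),
      pre ++ '_' :: post = key ++ '_' :: rest → '_' ∉ pre → '_' ∉ key → key = pre := by
  induction pre with
  | nil =>
    intro key post rest h _ hk
    cases key with
    | nil => rfl
    | cons c k' =>
      exfalso
      simp at h
      exact hk (by simp [h.1.symm])
  | cons a pre' ih =>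
    intro key post rest h hp hk
    cases key with
    | nil =>
      exfalso
      simp at h
      exact hp (by simp [h.1])
    | cons c k' =>
      simp at h
      obtain ⟨hac, hrest⟩ := h
      have := ih k' post rest hrest (by simp at hp; exact hp.2) (by simp at hk; exact hk.2)
      simp [hac, this]

lemma nf_startswith_iff (cs pre post key : List Char)
    (hcs : cs = pre ++ '_' :: post) (hp : '_' ∉ pre) (hk : '_' ∉ key) :
    PySem.Chars.startswith cs (key ++ ['_']) = true ↔ key = pre := by
  constructor
  · intro h
    simp [PySem.Chars.startswith, List.isPrefixOf_iff_prefix] at h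
    obtain ⟨rest, hrest⟩ := h
    have : pre ++ '_' :: post = key ++ '_' :: rest := by
      rw [hcs] at hrest; simpa using hrest.symm
    exact nf_first_underscore_unique pre key post rest this hp hk
  · intro h
    subst h
    simp [hcs, PySem.Chars.startswith, List.isPrefixOf_iff_prefix]

lemma nf_startswith_false (cs key : List Char) (h : '_' ∉ cs) :
    PySem.Chars.startswith cs (key ++ ['_']) = false := by
  by_contra hb
  simp [PySem.Chars.startswith, List.isPrefixOf_iff_prefix] at hb
  obtain ⟨rest, hrest⟩ := hb
  exact h (by rw [← hrest]; simp)

-- ===== VERDICT (by name: the statement is the Claim_ definition above) =====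
theorem normalize_family_spec : Claim_equal_normalize_family := by
  intro s _
  unfold Spec_normalize_family
  by_cases hs : s = ""
  · simp [normalize_family, normalize_family_alt, hs]
  · rcases nf_find_split s.toList with ⟨h1, h2⟩ | ⟨pre, post, hcs, hp, hf⟩
    · -- no underscore in s: both sides return s unchanged
      have hfind : PySem.Str.find s "_" = -1 := by
        simpa [PySem.Str.find] using h1
      have c1 : PySem.Chars.startswith s.toList ['C','1','_'] = false := by
        simpa using nf_startswith_false s.toList ['C','1'] h2
      have c2 : PySem.Chars.startswith s.toList ['P','0','-','2','_'] = false := by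
        simpa using nf_startswith_false s.toList ['P','0','-','2'] h2
      have c3 : PySem.Chars.startswith s.toList ['P','1','-','2','_'] = false := by
        simpa using nf_startswith_false s.toList ['P','1','-','2'] h2
      have c4 : PySem.Chars.startswith s.toList ['P','1','-','6','_'] = false := by
        simpa using nf_startswith_false s.toList ['P','1','-','6'] h2
      have c5 : PySem.Chars.startswith s.toList ['P','1','-','8','_'] = false := by
        simpa using nf_startswith_false s.toList ['P','1','-','8'] h2
      have c6 : PySem.Chars.startswith s.toList ['P','1','-','9','_'] = false := by
        simpa using nf_startswith_false s.toList ['P','1','-','9'] h2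
      have c7 : PySem.Chars.startswith s.toList ['P','1','-','1','0','_'] = false := by
        simpa using nf_startswith_false s.toList ['P','1','-','1','0'] h2
      have c8 : PySem.Chars.startswith s.toList ['P','1','-','1','1','_'] = false := by
        simpa using nf_startswith_false s.toList ['P','1','-','1','1'] h2
      simp [normalize_family, normalize_family_alt, hs, h1, nfPrefixes, nfLoop,
        PySem.Str.startswith, c1, c2, c3, c4, c5, c6, c7, c8]
    · -- s = pre ++ '_' :: post with '_' ∉ pre: first underscore at pre.length
      have hfind : PySem.Str.find s "_" = (pre.length : Int) := by
        simpa [PySem.Str.find] using hf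
      have hcand : PySem.Str.slice s none (some ((pre.length : Nat) : Int)) =
          String.ofList pre := by
        simp [PySem.Str.slice, PySem.List.slice_to_natCast, hcs]
      have hst : ∀ key : List Char, '_' ∉ key →
          PySem.Chars.startswith s.toList (key ++ ['_']) = decide (key = pre) := by
        intro key hk
        by_cases h : key = pre
        · subst h
          have := (nf_startswith_iff s.toList key post key hcs hp hk).2 rfl
          simp [this]
        · rw [decide_eq_false h]
          exact Bool.eq_false_iff.mpr
            (fun hb => h ((nf_startswith_iff s.toList pre post key hcs hp hk).1 hb))
      have c1 : PySem.Chars.startswith s.toList ['C','1','_'] = decide (['C','1'] = pre) := by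
        simpa using hst ['C','1'] (by decide)
      have c2 : PySem.Chars.startswith s.toList ['P','0','-','2','_'] = decide (['P','0','-','2'] = pre) := by
        simpa using hst ['P','0','-','2'] (by decide)
      have c3 : PySem.Chars.startswith s.toList ['P','1','-','2','_'] = decide (['P','1','-','2'] = pre) := by
        simpa using hst ['P','1','-','2'] (by decide)
      have c4 : PySem.Chars.startswith s.toList ['P','1','-','6','_'] = decide (['P','1','-','6'] = pre) := by
        simpa using hst ['P','1','-','6'] (by decide)
      have c5 : PySem.Chars.startswith s.toList ['P','1','-','8','_'] = decide (['P','1','-','8'] = pre) := by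
        simpa using hst ['P','1','-','8'] (by decide)
      have c6 : PySem.Chars.startswith s.toList ['P','1','-','9','_'] = decide (['P','1','-','9'] = pre) := by
        simpa using hst ['P','1','-','9'] (by decide)
      have c7 : PySem.Chars.startswith s.toList ['P','1','-','1','0','_'] = decide (['P','1','-','1','0'] = pre) := by
        simpa using hst ['P','1','-','1','0'] (by decide)
      have c8 : PySem.Chars.startswith s.toList ['P','1','-','1','1','_'] = decide (['P','1','-','1','1'] = pre) := by
        simpa using hst ['P','1','-','1','1'] (by decide)
      have hBval : normalize_family_alt s =
          (if nfKeys.contains (String.ofList pre) then String.ofList pre else s) := by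
        simp only [normalize_family_alt, if_neg hs, hfind]
        rw [if_neg (by omega : ¬ ((pre.length : Nat) : Int) = -1), hcand]
      rw [hBval]
      simp [normalize_family, hs, nfPrefixes, nfLoop, PySem.Str.startswith,
        c1, c2, c3, c4, c5, c6, c7, c8]
      by_cases e1 : ['C','1'] = pre
      · subst e1
        have m : String.ofList ['C','1'] ∈ nfKeys := by decide
        simp [m]
        decide
      by_cases e2 : ['P','0','-','2'] = pre
      · subst e2
        have m : String.ofList ['P','0','-','2'] ∈ nfKeys := by decide
        simp [m]
        decide
      by_cases e3 : ['P','1','-','2'] = pre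
      · subst e3
        have m : String.ofList ['P','1','-','2'] ∈ nfKeys := by decide
        simp [m]
        decide
      by_cases e4 : ['P','1','-','6'] = pre
      · subst e4
        have m : String.ofList ['P','1','-','6'] ∈ nfKeys := by decide
        simp [m]
        decide
      by_cases e5 : ['P','1','-','8'] = pre
      · subst e5
        have m : String.ofList ['P','1','-','8'] ∈ nfKeys := by decide
        simp [m]
        decide
      by_cases e6 : ['P','1','-','9'] = pre
      · subst e6
        have m : String.ofList ['P','1','-','9'] ∈ nfKeys := by decide
        simp [m]
        decide
      by_cases e7 : ['P','1','-','1','0'] = pre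
      · subst e7
        have m : String.ofList ['P','1','-','1','0'] ∈ nfKeys := by decide
        simp [m]
        decide
      by_cases e8 : ['P','1','-','1','1'] = pre
      · subst e8
        have m : String.ofList ['P','1','-','1','1'] ∈ nfKeys := by decide
        simp [m]
        decide
      · have m : String.ofList pre ∉ nfKeys := by
          intro hm
          have hds := (PySem.Set.mem_ofList _ _).1 hm
          simp at hds
          rcases hds with h | h | h | h | h | h | h | h
          · exact e1 (by have := congrArg String.toList h; simp at this; exact this.symm)
          · exact e2 (by have := congrArg String.toList h; simp at this; exact this.symm)
          · exact e3 (by have := congrArg String.toList h; simp at this; exact this.symm)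
          · exact e4 (by have := congrArg String.toList h; simp at this; exact this.symm)
          · exact e5 (by have := congrArg String.toList h; simp at this; exact this.symm)
          · exact e6 (by have := congrArg String.toList h; simp at this; exact this.symm)
          · exact e7 (by have := congrArg String.toList h; simp at this; exact this.symm)
          · exact e8 (by have := congrArg String.toList h; simp at this; exact this.symm)
        simp [e1, e2, e3, e4, e5, e6, e7, e8, m]
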